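-- pv_equiv track=rewrite | github.com/Bobo-BKL/BookCoding-This_is_coding_test | Ch11_알고리즘 기출문제/09_문자열압축.py | solution
-- ===== SOURCE A (Python) =====
-- def solution(s):
--     answer = len(s)
--     for step in range(1, len(s) // 2+ 1):
--         prev = s[0:step]
--         rept = 1
--         sum = ''
--         for i in range(step, len(s), step):
--             if prev == s[i:i + step]:
--                 rept += 1
--             else:
--                 if rept >= 2:
--                     sum += str(rept) + prev
--                 else: sum += prev
--
--                 rept = 1
--                 prev = s[i:i + step]
--
--         sum += str(rept) + prev if rept >= 2 else prev
--         answer = min(answer, len(sum))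
--
--     return answer
-- ===== SOURCE B (Python) =====
-- def solution(s):
--     # Savings-based: start each candidate total at len(s) and subtract step for
--     # every chunk equal to its predecessor, re-adding 1 whenever the run count
--     # reaches the next digit-length threshold (2, 10, 100, ...); no compressed
--     # text and no run grouping is ever materialised.
--     n = len(s)
--     best = n
--     for step in range(1, n // 2 + 1):
--         total = n
--         run = 1
--         thresh = 2
--         for i in range(step, n, step):
--             if s[i - step:i] == s[i:i + step]:
--                 run += 1
--                 total -= step
--                 if run == thresh:
--                     total += 1
--                     thresh = 10 if thresh == 2 else thresh * 10
--             else: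
--                 run = 1
--                 thresh = 2
--         best = min(best, total)
--     return best
-- ===== Notes on version B (the rewrite author's own statement) =====
-- stated objective: alternative
-- what changed: A builds the compressed string for each chunk size and measures it; B never materialises any compression or run grouping: it starts the candidate total at len(s), subtracts step for every chunk equal to its predecessor, and adds 1 back each time the run counter reaches the next digit-length threshold (2, 10, 100, ...).
import Mathlib
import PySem

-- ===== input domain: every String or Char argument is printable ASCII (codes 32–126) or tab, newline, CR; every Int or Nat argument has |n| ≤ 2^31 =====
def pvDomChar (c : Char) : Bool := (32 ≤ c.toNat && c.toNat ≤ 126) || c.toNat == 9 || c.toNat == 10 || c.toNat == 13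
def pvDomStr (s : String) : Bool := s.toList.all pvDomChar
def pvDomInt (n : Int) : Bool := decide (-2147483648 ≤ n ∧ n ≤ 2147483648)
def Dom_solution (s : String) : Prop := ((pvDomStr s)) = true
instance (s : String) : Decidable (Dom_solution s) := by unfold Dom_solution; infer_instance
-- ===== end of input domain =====

-- B replaces A's compressed-string builder by a savings count: each candidate total
-- starts at len(s), drops by step per chunk equal to its predecessor, and regains 1
-- whenever the run count reaches the next digit threshold 2, 10, 100, … (objective: alternative).

-- ===== PORT A =====
def solution (s : String) : Int :=
  let cs := s.toList
  (PySem.List.pyRange 1 (PySem.Int.floordiv (PySem.Str.len s) 2 + 1) 1).foldl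
    (fun answer step =>
      let st := (PySem.List.pyRange step (PySem.Str.len s) step).foldl
        (fun (st : List Char × Int × List Char) i =>
          if st.1 = PySem.List.slice cs (some i) (some (i + step)) then
            (st.1, st.2.1 + 1, st.2.2)
          else
            (PySem.List.slice cs (some i) (some (i + step)), 1,
             st.2.2 ++ (if 2 ≤ st.2.1 then PySem.Int.toChars st.2.1 ++ st.1 else st.1)))
        (PySem.List.slice cs (some 0) (some step), 1, [])
      let final := st.2.2 ++ (if 2 ≤ st.2.1 then PySem.Int.toChars st.2.1 ++ st.1 else st.1)
      min answer ((final.length : Int)))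
    (PySem.Str.len s)

-- ===== PORT B =====
-- state of Source B's inner loop: (run, thresh, total)
def solution_alt (s : String) : Int :=
  let cs := s.toList
  let n := PySem.Str.len s
  (PySem.List.pyRange 1 (PySem.Int.floordiv n 2 + 1) 1).foldl
    (fun best step =>
      let st := (PySem.List.pyRange step n step).foldl
        (fun (st : Int × Int × Int) i =>
          if PySem.List.slice cs (some (i - step)) (some i)
              = PySem.List.slice cs (some i) (some (i + step)) then
            let run := st.1 + 1
            let total := st.2.2 - step
            if run = st.2.1 then
              (run, (if st.2.1 = 2 then 10 else st.2.1 * 10), total + 1)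
            else (run, st.2.1, total)
          else (1, 2, st.2.2))
        (1, 2, n)
      min best st.2.2)
    n

-- ===== PRECONDITION & SPEC =====
def Spec_solution (s : String) (out : Int) : Prop := out = solution_alt s
instance (s : String) (out : Int) : Decidable (Spec_solution s out) := by unfold Spec_solution; infer_instance

-- ===== CLAIM (what is proved, stated in full; the proofs are below) =====
def Claim_equal_solution : Prop := ∀ (s : String), Dom_solution s → Spec_solution s (solution s)

-- ===== LEMMAS AND PROOFS =====

-- proof-only abstractions of the two inner loop bodies
def aStep (cs : List Char) (step : Int) (st : List Char × Int × List Char) (i : Int) :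
    List Char × Int × List Char :=
  if st.1 = PySem.List.slice cs (some i) (some (i + step)) then
    (st.1, st.2.1 + 1, st.2.2)
  else
    (PySem.List.slice cs (some i) (some (i + step)), 1,
     st.2.2 ++ (if 2 ≤ st.2.1 then PySem.Int.toChars st.2.1 ++ st.1 else st.1))

def aFinal (st : List Char × Int × List Char) : Int :=
  ((st.2.2 ++ (if 2 ≤ st.2.1 then PySem.Int.toChars st.2.1 ++ st.1 else st.1)).length : Int)

def bStep (cs : List Char) (step : Int) (st : Int × Int × Int) (i : Int) : Int × Int × Int :=
  if PySem.List.slice cs (some (i - step)) (some i)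
      = PySem.List.slice cs (some i) (some (i + step)) then
    if st.1 + 1 = st.2.1 then
      (st.1 + 1, (if st.2.1 = 2 then 10 else st.2.1 * 10), st.2.2 - step + 1)
    else (st.1 + 1, st.2.1, st.2.2 - step)
  else (1, 2, st.2.2)

-- digit-length bookkeeping
def dlen (r : Int) : Int := if 2 ≤ r then ((PySem.Int.toChars r).length : Int) else 0
def threshOf (r : Int) : Int := if r = 1 then 2 else ((10 ^ (Nat.log 10 r.toNat + 1) : ℕ) : Int)

lemma emit_len (r : Int) (p : List Char) :
    (((if 2 ≤ r then PySem.Int.toChars r ++ p else p)).length : Int)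
      = (p.length : Int) + dlen r := by
  unfold dlen; split_ifs
  · push_cast [List.length_append]; ring
  · ring

lemma tdc_len : ∀ (f n : ℕ) (l : List Char), n < f →
    (Nat.toDigitsCore 10 f n l).length = Nat.log 10 n + 1 + l.length := by
  intro f
  induction f with
  | zero => intro n l h; omega
  | succ f ih =>
      intro n l h
      rw [Nat.toDigitsCore]
      by_cases h0 : n / 10 = 0
      · have hn : n < 10 := by omega
        simp [h0, Nat.log_eq_zero_iff.mpr (Or.inl hn)]; omega
      · have hn : 10 ≤ n := by
          by_contra hc; exact h0 (Nat.div_eq_of_lt (by omega))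
        have hrec : n / 10 < f := by
          have := Nat.div_lt_self (by omega : 0 < n) (by omega : 1 < 10)
          omega
        simp only [if_neg h0, ih _ _ hrec]
        have hlog : Nat.log 10 n = Nat.log 10 (n / 10) + 1 :=
          (Nat.log_div_base 10 n) ▸ by
            have h1 : 1 ≤ Nat.log 10 n := by
              rw [Nat.one_le_iff_ne_zero]
              intro hz
              rcases Nat.log_eq_zero_iff.mp hz with h' | h' <;> omega
            omega
        rw [hlog]; simp only [List.length_cons]; omega

lemma toChars_len (r : Int) (h : 1 ≤ r) :
    (PySem.Int.toChars r).length = Nat.log 10 r.toNat + 1 := by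
  unfold PySem.Int.toChars
  rw [if_neg (by omega)]
  rw [Nat.toDigits, tdc_len _ _ _ (Nat.lt_succ_self _)]
  simp

lemma dlen_step (r : Int) (h : 1 ≤ r) :
    dlen (r + 1) = dlen r + (if r + 1 = threshOf r then 1 else 0) := by
  by_cases h1 : r = 1
  · subst h1
    have : threshOf 1 = 2 := by unfold threshOf; simp
    rw [this]
    unfold dlen
    rw [if_pos (by omega : (2:Int) ≤ 1 + 1), if_neg (by omega : ¬ (2:Int) ≤ 1)]
    have hl : ((PySem.Int.toChars (1 + 1 : Int)).length : Int) = 1 := by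
      rw [toChars_len _ (by omega)]
      have h2 : ((1:Int) + 1).toNat = 2 := by omega
      rw [h2, Nat.log_eq_zero_iff.mpr (Or.inl (by omega))]
      norm_num
    rw [hl]
    norm_num
  · have h2 : 2 ≤ r := by omega
    have hT : threshOf r = ((10 ^ (Nat.log 10 r.toNat + 1) : ℕ) : Int) := by
      unfold threshOf; rw [if_neg h1]
    have hub : r.toNat < 10 ^ (Nat.log 10 r.toNat + 1) := Nat.lt_pow_succ_log_self (by omega) _
    have hlb : 10 ^ Nat.log 10 r.toNat ≤ r.toNat := Nat.pow_log_le_self 10 (by omega)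
    unfold dlen
    rw [if_pos (by omega : 2 ≤ r + 1), if_pos h2,
      toChars_len r (by omega), toChars_len (r + 1) (by omega)]
    have hsucc : (r + 1).toNat = r.toNat + 1 := by omega
    by_cases hpow : r + 1 = threshOf r
    · have hp : r.toNat + 1 = 10 ^ (Nat.log 10 r.toNat + 1) := by
        rw [hT] at hpow; omega
      rw [if_pos hpow, hsucc, hp, Nat.log_pow (by omega)]
      push_cast; ring
    · have hp : r.toNat + 1 ≠ 10 ^ (Nat.log 10 r.toNat + 1) := by
        intro hc; apply hpow; rw [hT]; omega
      have hlog : Nat.log 10 (r.toNat + 1) = Nat.log 10 r.toNat :=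
        Nat.log_eq_of_pow_le_of_lt_pow (le_trans hlb (by omega)) (by omega)
      rw [if_neg hpow, hsucc, hlog]
      push_cast; ring

lemma thresh_step (r : Int) (h : 1 ≤ r) :
    threshOf (r + 1)
      = if r + 1 = threshOf r then (if threshOf r = 2 then 10 else threshOf r * 10)
        else threshOf r := by
  by_cases h1 : r = 1
  · subst h1
    have hT : threshOf 1 = 2 := by unfold threshOf; simp
    rw [hT, if_pos (by norm_num), if_pos rfl]
    unfold threshOf
    rw [if_neg (by omega : (1:Int) + 1 ≠ 1)]
    have h2 : ((1:Int) + 1).toNat = 2 := by omega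
    rw [h2, Nat.log_eq_zero_iff.mpr (Or.inl (by omega))]
    norm_num
  · have h2 : 2 ≤ r := by omega
    have hT : threshOf r = ((10 ^ (Nat.log 10 r.toNat + 1) : ℕ) : Int) := by
      unfold threshOf; rw [if_neg h1]
    have hub : r.toNat < 10 ^ (Nat.log 10 r.toNat + 1) := Nat.lt_pow_succ_log_self (by omega) _
    have hlb : 10 ^ Nat.log 10 r.toNat ≤ r.toNat := Nat.pow_log_le_self 10 (by omega)
    have hsucc : (r + 1).toNat = r.toNat + 1 := by omega
    have hT1 : threshOf (r + 1) = ((10 ^ (Nat.log 10 (r.toNat + 1) + 1) : ℕ) : Int) := by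
      unfold threshOf; rw [if_neg (by omega : r + 1 ≠ 1), hsucc]
    by_cases hpow : r + 1 = threshOf r
    · have hp : r.toNat + 1 = 10 ^ (Nat.log 10 r.toNat + 1) := by
        rw [hT] at hpow; omega
      have hne2 : threshOf r ≠ 2 := by
        rw [hT]
        have h10 : 10 ^ (1:ℕ) ≤ 10 ^ (Nat.log 10 r.toNat + 1) :=
          Nat.pow_le_pow_right (by omega) (by omega)
        rw [pow_one] at h10
        omega
      rw [if_pos hpow, if_neg hne2, hT1, hp, Nat.log_pow (by omega), hT]
      push_cast; ring
    · have hp : r.toNat + 1 ≠ 10 ^ (Nat.log 10 r.toNat + 1) := by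
        intro hc; apply hpow; rw [hT]; omega
      have hlog : Nat.log 10 (r.toNat + 1) = Nat.log 10 r.toNat :=
        Nat.log_eq_of_pow_le_of_lt_pow (le_trans hlb (by omega)) (by omega)
      rw [if_neg hpow, hT1, hlog, hT]

lemma pyRange_pos_cons (a b st : Int) (hst : 0 < st) (hab : a < b) :
    PySem.List.pyRange a b st = a :: PySem.List.pyRange (a + st) b st := by
  rw [PySem.List.pyRange_of_pos _ _ hst, PySem.List.pyRange_of_pos _ _ hst]
  by_cases h : a + st < b
  · rw [if_pos hab, if_pos h]
    have hcnt : ((b - a + st - 1) / st).toNat = ((b - (a + st) + st - 1) / st).toNat + 1 := by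
      have he : b - a + st - 1 = (b - (a + st) + st - 1) + 1 * st := by ring
      rw [he, Int.add_mul_ediv_right _ _ (by omega : st ≠ 0)]
      have h0 : 0 ≤ (b - (a + st) + st - 1) / st :=
        Int.ediv_nonneg (by omega) (by omega)
      omega
    rw [hcnt, List.range_succ_eq_map]
    simp [List.map_map, Function.comp_def]
    intro k _
    ring
  · rw [if_pos hab, if_neg h]
    have hcnt : ((b - a + st - 1) / st).toNat = 1 := by
      have hge : (1 : Int) ≤ (b - a + st - 1) / st :=
        (Int.le_ediv_iff_mul_le hst).mpr (by omega)
      have hlt : (b - a + st - 1) / st < 2 :=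
        (Int.ediv_lt_iff_lt_mul hst).mpr (by omega)
      omega
    rw [hcnt]
    simp

lemma pyRange_pos_nil (a b st : Int) (hst : 0 < st) (hab : b ≤ a) :
    PySem.List.pyRange a b st = [] := by
  rw [PySem.List.pyRange_of_pos _ _ hst, if_neg (by omega)]
  simp

lemma slice_len (cs : List Char) (a b : Int) (ha : 0 ≤ a) (hab : a ≤ b) (hb : a ≤ cs.length) :
    ((PySem.List.slice cs (some a) (some b)).length : Int)
      = min b (cs.length : Int) - a := by
  rw [PySem.List.length_slice]
  have h1 : PySem.List.clampIdx cs.length a = a.toNat := by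
    unfold PySem.List.clampIdx; split_ifs <;> omega
  have h2 : PySem.List.clampIdx cs.length b = (min b (cs.length : Int)).toNat := by
    unfold PySem.List.clampIdx; split_ifs <;> omega
  rw [h1, h2]
  omega

-- the inner-loop correspondence: B's running total equals A's final compressed length
lemma inner (cs : List Char) (step : Int) (hst : 0 < step) :
    ∀ (k : ℕ) (i0 rept : Int) (prev acc : List Char),
      ((cs.length : Int) - i0).toNat ≤ k →
      step ≤ i0 → i0 ≤ (cs.length : Int) → 1 ≤ rept →
      prev = PySem.List.slice cs (some (i0 - step)) (some i0) →
      ((PySem.List.pyRange i0 (cs.length : Int) step).foldl (bStep cs step)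
          (rept, threshOf rept,
           (acc.length : Int) + ((prev.length : Int) + dlen rept) + ((cs.length : Int) - i0))).2.2
        = aFinal ((PySem.List.pyRange i0 (cs.length : Int) step).foldl (aStep cs step)
            (prev, rept, acc)) := by
  intro k
  induction k with
  | zero =>
      intro i0 rept prev acc hk h1 h2 h3 hprev
      have hi0 : i0 = (cs.length : Int) := by omega
      rw [pyRange_pos_nil _ _ _ hst (by omega)]
      simp only [List.foldl_nil, aFinal, List.length_append]
      push_cast
      rw [emit_len]
      omega
  | succ k ih =>
      intro i0 rept prev acc hk h1 h2 h3 hprev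
      by_cases hlt : i0 < (cs.length : Int)
      · rw [pyRange_pos_cons _ _ _ hst hlt]
        simp only [List.foldl_cons]
        have hprevlen : (prev.length : Int) = step := by
          rw [hprev, slice_len cs _ _ (by omega) (by omega) (by omega)]
          omega
        have hchlen : ((PySem.List.slice cs (some i0) (some (i0 + step))).length : Int)
            = min (i0 + step) (cs.length : Int) - i0 :=
          slice_len cs _ _ (by omega) (by omega) (by omega)
        by_cases hm : prev = PySem.List.slice cs (some i0) (some (i0 + step))
        · -- run continues
          have hfit : i0 + step ≤ (cs.length : Int) := by
            rw [← hm, hprevlen] at hchlen; omega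
          have hbcond : PySem.List.slice cs (some (i0 - step)) (some i0)
              = PySem.List.slice cs (some i0) (some (i0 + step)) := by rw [← hprev, hm]
          have hastate : aStep cs step (prev, rept, acc) i0 = (prev, rept + 1, acc) := by
            unfold aStep; rw [if_pos hm]
          have hstate : bStep cs step (rept, threshOf rept,
                (acc.length : Int) + ((prev.length : Int) + dlen rept) + ((cs.length : Int) - i0)) i0
              = (rept + 1, threshOf (rept + 1),
                (acc.length : Int) + ((prev.length : Int) + dlen (rept + 1))
                  + ((cs.length : Int) - (i0 + step))) := by
            unfold bStep
            rw [if_pos hbcond, dlen_step rept h3, thresh_step rept h3]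
            by_cases hd : rept + 1 = threshOf rept
            · simp only [if_pos hd, Prod.mk.injEq]
              refine ⟨by trivial, by trivial, by ring⟩
            · simp only [if_neg hd, Prod.mk.injEq]
              refine ⟨by trivial, by trivial, by ring⟩
          have hnext : prev = PySem.List.slice cs (some (i0 + step - step)) (some (i0 + step)) := by
            rw [show i0 + step - step = i0 by ring, hm]
          rw [hastate, hstate]
          exact ih (i0 + step) (rept + 1) prev acc (by omega) (by omega) hfit (by omega) hnext
        · -- run breaks: A emits, B resets
          have hbcond : ¬ PySem.List.slice cs (some (i0 - step)) (some i0)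
              = PySem.List.slice cs (some i0) (some (i0 + step)) := by
            rw [← hprev]; exact hm
          have hT1 : threshOf 1 = 2 := by unfold threshOf; simp
          have hd1 : dlen 1 = 0 := by unfold dlen; norm_num
          have hastate : aStep cs step (prev, rept, acc) i0
              = (PySem.List.slice cs (some i0) (some (i0 + step)), 1,
                 acc ++ (if 2 ≤ rept then PySem.Int.toChars rept ++ prev else prev)) := by
            unfold aStep; rw [if_neg hm]
          have hstate : bStep cs step (rept, threshOf rept,
                (acc.length : Int) + ((prev.length : Int) + dlen rept) + ((cs.length : Int) - i0)) i0
              = (1, threshOf 1,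
                (acc.length : Int) + ((prev.length : Int) + dlen rept) + ((cs.length : Int) - i0)) := by
            unfold bStep; rw [if_neg hbcond, hT1]
          rw [hastate, hstate]
          by_cases hfit : i0 + step ≤ (cs.length : Int)
          · have hnext : PySem.List.slice cs (some i0) (some (i0 + step))
                = PySem.List.slice cs (some (i0 + step - step)) (some (i0 + step)) := by
              rw [show i0 + step - step = i0 by ring]
            have hTot : (acc.length : Int) + ((prev.length : Int) + dlen rept) + ((cs.length : Int) - i0)
                = (((acc ++ (if 2 ≤ rept then PySem.Int.toChars rept ++ prev else prev)).length : Int))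
                  + (((PySem.List.slice cs (some i0) (some (i0 + step))).length : Int) + dlen 1)
                  + ((cs.length : Int) - (i0 + step)) := by
              push_cast [List.length_append]
              rw [emit_len, hd1, hchlen]
              omega
            rw [hTot]
            exact ih (i0 + step) 1
              (PySem.List.slice cs (some i0) (some (i0 + step)))
              (acc ++ (if 2 ≤ rept then PySem.Int.toChars rept ++ prev else prev))
              (by omega) (by omega) hfit (by omega) hnext
          · -- last (short) chunk: both ranges are now empty
            rw [pyRange_pos_nil _ _ _ hst (by omega)]
            simp only [List.foldl_nil, aFinal, List.length_append]
            push_cast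
            rw [emit_len, hchlen]
            omega
      · -- range exhausted
        rw [pyRange_pos_nil _ _ _ hst (by omega)]
        simp only [List.foldl_nil, aFinal, List.length_append]
        push_cast
        rw [emit_len]
        omega

lemma step_eq (cs : List Char) (step : Int) (hst : 0 < step) (hstep : step ≤ (cs.length : Int)) :
    ((PySem.List.pyRange step (cs.length : Int) step).foldl (bStep cs step)
        (1, 2, (cs.length : Int))).2.2
      = aFinal ((PySem.List.pyRange step (cs.length : Int) step).foldl (aStep cs step)
          (PySem.List.slice cs (some 0) (some step), 1, [])) := by
  have hT1 : threshOf 1 = 2 := by unfold threshOf; simp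
  have hd1 : dlen 1 = 0 := by unfold dlen; norm_num
  have hplen : (((PySem.List.slice cs (some 0) (some step)).length : Int)) = step :=
    by rw [slice_len cs 0 step le_rfl (by omega) (by omega)]; omega
  have := inner cs step hst ((cs.length : Int) - step).toNat step 1
    (PySem.List.slice cs (some 0) (some step)) [] le_rfl le_rfl hstep le_rfl
    (by rw [show step - step = (0:Int) by ring])
  rw [← this, hT1, hd1, hplen]
  norm_num

-- ===== VERDICT (by name: the statement is the Claim_ definition above) =====
theorem solution_spec : Claim_equal_solution := by
  intro s _
  unfold Spec_solution solution solution_alt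
  simp only [PySem.Str.len_eq]
  refine PySem.List.foldl_congr_mem _ _ _ _ ?_
  intro acc step hmem
  have h1 : (1 : Int) ≤ step := (PySem.List.mem_pyRange_one.mp hmem).1
  have h2 : step < PySem.Int.floordiv (s.toList.length : Int) 2 + 1 :=
    (PySem.List.mem_pyRange_one.mp hmem).2
  have hstep : step ≤ (s.toList.length : Int) := by
    have hd : PySem.Int.floordiv (s.toList.length : Int) 2
        = (s.toList.length : Int) / 2 - if (0:Int) ≤ 2 ∨ (2:Int) ∣ (s.toList.length : Int) then 0 else 1 := by
      unfold PySem.Int.floordiv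
      exact Int.fdiv_eq_ediv
    rw [if_pos (Or.inl (by norm_num))] at hd
    omega
  exact congrArg (min acc) (step_eq s.toList step (by omega) hstep).symm
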